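-- pv_equiv track=rewrite | github.com/Sangmin-Jeon/Problem_Solving | 프로그래머스/1/135808. 과일 장수/과일 장수.py | solution
-- ===== SOURCE A (Python) =====
-- def solution(k, m, score):
--     answer = 0
--     score.sort(reverse=True)
--
--     def get_sep_score():
--         sep_score = []
--         temp = []
--         for _score in score:
--             temp.append(_score)
--             if len(temp) == m:
--                 sep_score.append(temp)
--                 temp = []
--         return sep_score
--
--     def cal_score(score):
--         answer = 0
--         for _score in score:
--             answer += _score[-1] * m
--
--         return answer
--
--     sep_score = get_sep_score()
--
--     return cal_score(sep_score)
-- ===== SOURCE B (Python) =====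
-- def solution(k, m, score):
--     # Group equal scores with a frequency dict, walk distinct values in descending
--     # order, and count chunk minima arithmetically: the minima sit at positions
--     # (1-based, descending order) divisible by m, and the block of the value v
--     # occupies positions c+1 .. c+f, which contains (c+f)//m - c//m such positions.
--     if m <= 0:
--         return 0
--     freq = {}
--     for x in score:
--         freq[x] = freq.get(x, 0) + 1
--     total = 0
--     c = 0
--     for v in sorted(freq, reverse=True):
--         f = freq[v]
--         total += v * m * ((c + f) // m - c // m)
--         c += f
--     return total
-- ===== Notes on version B (the rewrite author's own statement) =====
-- stated objective: alternative
-- what changed: Replaces A's sort-all-elements-then-build-m-sized-chunk-lists with a frequency dict: only the distinct values are sorted, walked in descending order, and each value-block's chunk minima are counted arithmetically as (c+f)//m - c//m, so no chunk lists and no per-element second pass exist.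
import Mathlib
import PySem

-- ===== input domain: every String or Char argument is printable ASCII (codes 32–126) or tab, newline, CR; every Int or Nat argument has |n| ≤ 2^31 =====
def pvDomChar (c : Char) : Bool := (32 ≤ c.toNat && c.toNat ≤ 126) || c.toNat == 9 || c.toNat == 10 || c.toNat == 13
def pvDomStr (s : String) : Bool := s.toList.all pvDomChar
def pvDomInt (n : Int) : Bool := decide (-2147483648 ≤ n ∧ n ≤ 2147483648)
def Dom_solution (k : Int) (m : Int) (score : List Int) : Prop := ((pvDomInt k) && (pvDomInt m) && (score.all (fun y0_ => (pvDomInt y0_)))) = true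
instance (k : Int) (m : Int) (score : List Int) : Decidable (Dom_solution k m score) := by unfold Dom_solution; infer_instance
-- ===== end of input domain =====

-- B groups equal scores in a frequency dict and, walking only the DISTINCT values in
-- descending order, counts each value-block's chunk minima arithmetically with two floor
-- divisions, instead of A's sort-everything-then-build-m-sized-chunk-lists (objective:
-- alternative). A sorts `score` in place; B does not mutate its argument — the
-- equivalence proved here is about the return value only.

-- ===== PORT A =====
-- A's inner loop of get_sep_score: state (sep_score, temp); temp.append(x); if len(temp)==m, flush.
def sepStep (m : Int) (st : List (List Int) × List Int) (x : Int) : List (List Int) × List Int :=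
  let temp := st.2 ++ [x]
  if (temp.length : Int) = m then (st.1 ++ [temp], ([] : List Int)) else (st.1, temp)

def getSepScore (m : Int) (s : List Int) : List (List Int) :=
  (s.foldl (sepStep m) ([], [])).1

-- cal_score: _score[-1] — every chunk has length m ≥ 1, so pyGetD with default 0 is exact here.
def calScore (m : Int) (sep : List (List Int)) : Int :=
  sep.foldl (fun acc c => acc + PySem.List.pyGetD c (-1) 0 * m) 0

def solution (k : Int) (m : Int) (score : List Int) : Int :=
  calScore m (getSepScore m (PySem.List.sorted score (fun x => x) true))

-- ===== PORT B =====
-- B's first loop: freq[x] = freq.get(x, 0) + 1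
def freqOf (score : List Int) : PySem.Dict Int Int :=
  score.foldl (fun d x => d.insert x (d.getD x 0 + 1)) PySem.Dict.empty

-- body of B's second loop, over the sorted distinct values; state (total, c)
def countStep (m : Int) (freq : PySem.Dict Int Int) (st : Int × Int) (v : Int) : Int × Int :=
  let f := freq.getD v 0
  (st.1 + v * m * (PySem.Int.floordiv (st.2 + f) m - PySem.Int.floordiv st.2 m), st.2 + f)

def solution_alt (k : Int) (m : Int) (score : List Int) : Int :=
  if m ≤ 0 then 0
  else
    ((PySem.List.sorted (freqOf score).keys (fun x => x) true).foldl
      (countStep m (freqOf score)) (0, 0)).1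

-- ===== PRECONDITION & SPEC =====
def Spec_solution (k : Int) (m : Int) (score : List Int) (out : Int) : Prop := out = solution_alt k m score
instance (k : Int) (m : Int) (score : List Int) (out : Int) : Decidable (Spec_solution k m score out) := by unfold Spec_solution; infer_instance

-- ===== CLAIM (what is proved, stated in full; the proofs are below) =====
def Claim_equal_solution : Prop := ∀ (k : Int) (m : Int) (score : List Int), Dom_solution k m score → Spec_solution k m score (solution k m score)

-- ===== LEMMAS AND PROOFS =====

-- Common yardstick both ports are reduced to: walk the descending order with a 1-based
-- position counter and add x*m at every position divisible by m.
def bStep (m : Int) (total : Int) (ix : Int × Int) : Int :=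
  if PySem.Int.mod ix.1 m = 0 then total + ix.2 * m else total

-- When m ≤ 0, len(temp) == m never fires (temp is nonempty when tested), so no chunk is ever flushed.
lemma getSep_nonpos (m : Int) (hm : m ≤ 0) (s : List Int) :
    ∀ chunks temp, (s.foldl (sepStep m) (chunks, temp)).1 = chunks := by
  induction s with
  | nil => intro chunks temp; rfl
  | cons x s ih =>
      intro chunks temp
      simp only [List.foldl_cons, sepStep]
      have : ¬ (((temp ++ [x]).length : Int) = m) := by
        simp only [List.length_append, List.length_cons, List.length_nil]
        omega
      simp only [this, if_false]
      exact ih chunks (temp ++ [x])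

-- The position-counter running total distributes over its start value.
lemma bfold_shift (m : Int) (s : List Int) :
    ∀ (i t : Int), (PySem.List.enumerate s i).foldl (bStep m) t
      = t + (PySem.List.enumerate s i).foldl (bStep m) 0 := by
  induction s with
  | nil => intro i t; simp [PySem.List.enumerate_nil]
  | cons x s ih =>
      intro i t
      simp only [PySem.List.enumerate_cons, List.foldl_cons, bStep]
      by_cases h : PySem.Int.mod i m = 0 <;> simp only [h, if_false, if_pos]
      · rw [ih (i + 1) (t + x * m), ih (i + 1) (0 + x * m)]; ring
      · rw [ih (i + 1) t]

-- The position-counter total from position i equals the one from i + m (the test only reads i mod m).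
lemma bfold_period (m : Int) (hm : 0 < m) (s : List Int) :
    ∀ i : Int, (PySem.List.enumerate s (i + m)).foldl (bStep m) 0
      = (PySem.List.enumerate s i).foldl (bStep m) 0 := by
  induction s with
  | nil => intro i; simp [PySem.List.enumerate_nil]
  | cons x s ih =>
      intro i
      simp only [PySem.List.enumerate_cons, List.foldl_cons, bStep]
      have hmod : PySem.Int.mod (i + m) m = PySem.Int.mod i m := by
        rw [PySem.Int.mod_eq_emod_of_pos hm, PySem.Int.mod_eq_emod_of_pos hm]
        simpa using Int.add_mul_emod_self_left i m 1
      rw [hmod]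
      have hstep : i + m + 1 = (i + 1) + m := by ring
      by_cases h : PySem.Int.mod i m = 0
      · simp only [h, if_pos]
        rw [bfold_shift m s (i + m + 1), bfold_shift m s (i + 1), hstep, ih (i + 1)]
      · simp only [h, if_false]
        rw [hstep, ih (i + 1)]

-- Main A-side invariant (0 < m): A's "flush chunks, sum chunk minima later" fold equals
-- the position-counter total started at position temp.length + 1, on top of the chunks already flushed.
lemma main_inv (m : Int) (hm : 0 < m) (s : List Int) :
    ∀ (chunks : List (List Int)) (temp : List Int), (temp.length : Int) < m →
      calScore m (s.foldl (sepStep m) (chunks, temp)).1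
        = calScore m chunks + (PySem.List.enumerate s ((temp.length : Int) + 1)).foldl (bStep m) 0 := by
  induction s with
  | nil =>
      intro chunks temp _
      simp [PySem.List.enumerate_nil]
  | cons x s ih =>
      intro chunks temp hlt
      simp only [List.foldl_cons, PySem.List.enumerate_cons, sepStep]
      have hlen : ((temp ++ [x]).length : Int) = (temp.length : Int) + 1 := by simp
      by_cases hfull : (((temp ++ [x]).length : Int) = m)
      · simp only [hfull, if_pos]
        have hi : (temp.length : Int) + 1 = m := by rw [← hlen]; exact hfull
        have h0 : ((([] : List Int)).length : Int) < m := by simpa using hm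
        rw [ih (chunks ++ [temp ++ [x]]) [] h0]
        have hmod : PySem.Int.mod ((temp.length : Int) + 1) m = 0 := by
          rw [hi, PySem.Int.mod_eq_emod_of_pos hm]
          exact Int.emod_self
        simp only [bStep, hmod, if_pos]
        rw [bfold_shift m s ((temp.length : Int) + 1 + 1) (0 + x * m)]
        have hper : (PySem.List.enumerate s ((temp.length : Int) + 1 + 1)).foldl (bStep m) 0
            = (PySem.List.enumerate s ((0 : Int) + 1)).foldl (bStep m) 0 := by
          have h : (temp.length : Int) + 1 + 1 = ((0 : Int) + 1) + m := by omega
          rw [h, bfold_period m hm s]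
        rw [hper]
        simp only [calScore, List.foldl_append, List.foldl_cons, List.foldl_nil,
          PySem.List.foldl_add]
        rw [PySem.List.pyGetD_neg_one_append_singleton temp x 0]
        simp only [List.length_nil, Int.natCast_zero]
        ring
      · simp only [hfull, if_false]
        have hne : (temp.length : Int) + 1 ≠ m := by rw [← hlen]; exact hfull
        have hlt' : (((temp ++ [x]).length : Int)) < m := by omega
        rw [ih chunks (temp ++ [x]) hlt']
        have hmod : ¬ PySem.Int.mod ((temp.length : Int) + 1) m = 0 := by
          rw [PySem.Int.mod_eq_emod_of_pos hm, Int.emod_eq_of_lt (by omega) (by omega)]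
          omega
        simp only [bStep, hmod, if_false]
        rw [hlen]

-- Floor division by a positive divisor steps by one exactly at the multiples of the divisor.
lemma fdiv_succ (a m : Int) (hm : 0 < m) :
    PySem.Int.floordiv (a + 1) m
      = PySem.Int.floordiv a m + (if PySem.Int.mod (a + 1) m = 0 then 1 else 0) := by
  rw [PySem.Int.floordiv_eq_ediv_of_pos hm, PySem.Int.floordiv_eq_ediv_of_pos hm,
    PySem.Int.mod_eq_emod_of_pos hm]
  by_cases h : (a + 1) % m = 0
  · simp only [h, if_true]
    obtain ⟨q, hq⟩ := Int.dvd_of_emod_eq_zero h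
    have h1 : (a + 1) / m = q := by rw [hq]; exact Int.mul_ediv_cancel_left q (by omega)
    have h2 : a / m = q - 1 := by
      have he : a = (m - 1) + m * (q - 1) := by linarith
      rw [he, Int.add_mul_ediv_left _ _ (by omega : m ≠ 0),
        Int.ediv_eq_zero_of_lt (by omega) (by omega)]
      omega
    omega
  · simp only [h, if_false]
    have h1 : a % m + 1 < m ∨ a % m + 1 = m := by
      have := Int.emod_lt_of_pos a hm; omega
    rcases h1 with h1 | h1
    · have h0 := Int.emod_nonneg a (by omega : m ≠ 0)
      have ha : a + 1 = (a % m + 1) + m * (a / m) := by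
        have := Int.mul_ediv_add_emod a m; omega
      rw [ha, Int.add_mul_ediv_left _ _ (by omega : m ≠ 0),
        Int.ediv_eq_zero_of_lt (by omega) (by omega)]
      omega
    · exfalso
      have ha : a + 1 = m * (a / m + 1) := by
        have := Int.mul_ediv_add_emod a m; linarith
      exact h (by rw [ha]; simp [Int.mul_emod_right])

-- A block of f equal values occupying positions c+1 .. c+f contributes v*m*((c+f)//m - c//m).
lemma block_sum (m : Int) (hm : 0 < m) (v : Int) :
    ∀ (f : Nat) (c t : Int),
      (PySem.List.enumerate (List.replicate f v) (c + 1)).foldl (bStep m) t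
        = t + v * m * (PySem.Int.floordiv (c + f) m - PySem.Int.floordiv c m) := by
  intro f
  induction f with
  | zero => intro c t; simp [PySem.List.enumerate_nil]
  | succ f ih =>
      intro c t
      simp only [List.replicate_succ, PySem.List.enumerate_cons, List.foldl_cons, bStep]
      have hsum : (c : Int) + (f + 1 : Nat) = (c + 1) + f := by push_cast; ring
      have hstep := fdiv_succ c m hm
      by_cases h : PySem.Int.mod (c + 1) m = 0
      · simp only [h, if_pos] at hstep ⊢
        rw [ih (c + 1) (t + v * m), hsum, hstep]
        ring
      · simp only [h, if_false] at hstep ⊢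
        rw [ih (c + 1) t, hsum, hstep]
        ring

-- B's fold over the distinct values equals the position-counter total over the expanded blocks.
lemma counter_fold (m : Int) (hm : 0 < m) (score : List Int) :
    ∀ (K : List Int) (acc c : Int),
      (K.foldl (countStep m (PySem.Dict.counter score)) (acc, c)).1
        = acc + (PySem.List.enumerate
            (K.flatMap (fun v => List.replicate (score.count v) v)) (c + 1)).foldl (bStep m) 0 := by
  intro K
  induction K with
  | nil => intro acc c; simp [PySem.List.enumerate_nil]
  | cons v K ih =>
      intro acc c
      simp only [List.foldl_cons, List.flatMap_cons, countStep,
        PySem.Dict.getD_counter, PySem.List.enumerate_append, List.foldl_append]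
      rw [block_sum m hm v (score.count v) c 0]
      have hlen : (c + 1) + ((List.replicate (score.count v) v).length : Int)
          = (c + (score.count v : Int)) + 1 := by simp; ring
      rw [hlen, bfold_shift m _ ((c + (score.count v : Int)) + 1)
        (0 + v * m * (PySem.Int.floordiv (c + (score.count v : Int)) m - PySem.Int.floordiv c m))]
      rw [ih (acc + v * m * (PySem.Int.floordiv (c + (score.count v : Int)) m - PySem.Int.floordiv c m))
        (c + (score.count v : Int))]
      ring

-- Counting in the expansion of nodup block values.
lemma count_flatMap_replicate (n : Int → Nat) (w : Int) :
    ∀ (K : List Int), K.Nodup →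
      (K.flatMap (fun v => List.replicate (n v) v)).count w = if w ∈ K then n w else 0 := by
  intro K
  induction K with
  | nil => intro _; simp
  | cons v K ih =>
      intro hnd
      rcases List.nodup_cons.mp hnd with ⟨hv, hnd'⟩
      simp only [List.flatMap_cons, List.count_append, ih hnd', List.count_replicate,
        List.mem_cons]
      by_cases hw : w = v
      · subst hw
        simp [hv]
      · simp [Ne.symm hw, hw]

-- The expansion of strictly descending block values is sorted descending.
lemma pairwise_flatMap_replicate (n : Int → Nat) :
    ∀ (K : List Int), K.Pairwise (fun a b => b < a) →
      (K.flatMap (fun v => List.replicate (n v) v)).Pairwise (fun a b : Int => b ≤ a) := by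
  intro K
  induction K with
  | nil => intro _; simp
  | cons v K ih =>
      intro hp
      rcases List.pairwise_cons.mp hp with ⟨hhead, htail⟩
      simp only [List.flatMap_cons]
      rw [List.pairwise_append]
      refine ⟨List.pairwise_replicate.mpr (Or.inr le_rfl), ih htail, ?_⟩
      intro a ha b hb
      rcases List.eq_of_mem_replicate ha with rfl
      rcases List.mem_flatMap.mp hb with ⟨w, hwK, hbw⟩
      rcases List.eq_of_mem_replicate hbw with rfl
      exact le_of_lt (hhead _ hwK)

-- The expanded blocks of the descending distinct values ARE the descending sort of score.
lemma blocks_eq_sorted (score : List Int) :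
    PySem.List.sorted score (fun x => x) true
      = (PySem.List.sorted (PySem.Set.ofList score) (fun x => x) true).flatMap
          (fun v => List.replicate (score.count v) v) := by
  have hKperm : (PySem.List.sorted (PySem.Set.ofList score) (fun x => x) true).Perm
      (PySem.Set.ofList score) := PySem.List.sorted_perm _ _ _
  have hKnd : (PySem.List.sorted (PySem.Set.ofList score) (fun x => x) true).Nodup :=
    hKperm.symm.nodup (PySem.Set.nodup_ofList score)
  have hKge : (PySem.List.sorted (PySem.Set.ofList score) (fun x => x) true).Pairwise
      (fun a b => b ≤ a) := PySem.List.sorted_pairwise_rev _ _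
  have hKgt : (PySem.List.sorted (PySem.Set.ofList score) (fun x => x) true).Pairwise
      (fun a b => b < a) := by
    refine (hKge.and hKnd).imp ?_
    rintro a b ⟨hle, hne⟩
    exact lt_of_le_of_ne hle (Ne.symm hne)
  have hmemK : ∀ x : Int, x ∈ PySem.List.sorted (PySem.Set.ofList score) (fun x => x) true
      ↔ x ∈ score := by
    intro x
    rw [PySem.List.mem_sorted]
    exact PySem.Set.mem_ofList _ _
  have hLperm : ((PySem.List.sorted (PySem.Set.ofList score) (fun x => x) true).flatMap
      (fun v => List.replicate (score.count v) v)).Perm score := by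
    rw [List.perm_iff_count]
    intro w
    rw [count_flatMap_replicate (fun v => score.count v) w _ hKnd]
    by_cases hw : w ∈ PySem.List.sorted (PySem.Set.ofList score) (fun x => x) true
    · simp [hw]
    · simp only [hw, if_false]
      exact (List.count_eq_zero_of_not_mem (fun h => hw ((hmemK w).mpr h))).symm
  exact List.Perm.eq_of_pairwise
    (fun a b _ _ h1 h2 => le_antisymm h2 h1)
    (PySem.List.sorted_pairwise_rev _ _)
    (pairwise_flatMap_replicate _ _ hKgt)
    ((PySem.List.sorted_perm score (fun x => x) true).trans hLperm.symm)

-- ===== VERDICT (by name: the statement is the Claim_ definition above) =====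
theorem solution_spec : Claim_equal_solution := by
  intro k m score _
  unfold Spec_solution solution solution_alt getSepScore
  by_cases hm : m ≤ 0
  · rw [if_pos hm, getSep_nonpos m hm _ [] []]
    rfl
  · rw [if_neg hm]
    have hm' : 0 < m := by omega
    have hA := main_inv m hm' (PySem.List.sorted score (fun x => x) true) [] []
      (by simpa using hm')
    have hfreq : freqOf score = PySem.Dict.counter score :=
      PySem.Dict.foldl_insert_getD_add_one_eq_counter score
    rw [hfreq, PySem.Dict.keys_counter]
    rw [counter_fold m hm' score _ 0 0]
    rw [← blocks_eq_sorted score]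
    simpa [calScore] using hA
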